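-- pv_equiv track=rewrite | github.com/FrogPickle/Clipmine | db_ops.py | _find_anchor_in_tokens
-- ===== SOURCE A (Python) =====
-- def _find_anchor_in_tokens(tokens, pattern, tok2seg, seg_lo, seg_hi):
--     best = None
--     m = len(pattern)
--     for i in range(0, len(tokens) - m + 1):
--         if tokens[i:i+m] == pattern:
--             covered = tok2seg[i:i+m]
--             overlap = min(max(covered), seg_hi) - max(min(covered), seg_lo) + 1
--             if best is None or overlap > best[2]:
--                 best = (i, i+m-1, overlap)
--     return best  # (tok_start, tok_end, overlap)
-- ===== SOURCE B (Python) =====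
-- def _find_anchor_in_tokens(tokens, pattern, tok2seg, seg_lo, seg_hi):
--     n, m = len(tokens), len(pattern)
--     # inverted index: token value -> its positions, built in one pass
--     index = {}
--     for i, t in enumerate(tokens):
--         index.setdefault(t, []).append(i)
--     # only positions of the first pattern token are candidates; score the matches
--     candidates = []
--     for i in index.get(pattern[0], []):
--         if i + m <= n and all(tokens[i + k] == pattern[k] for k in range(1, m)):
--             cov = tok2seg[i:i + m]
--             candidates.append((min(max(cov), seg_hi) - max(min(cov), seg_lo) + 1, -i))
--     if not candidates:
--         return None
--     ov, ni = max(candidates)  # lexicographic: max overlap, leftmost among ties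
--     return (-ni, -ni + m - 1, ov)
-- ===== Notes on version B (the rewrite author's own statement) =====
-- stated objective: alternative
-- what changed: B replaces A's slice-compare scan over every window with an inverted index (one pass builds token -> positions) so only positions of the first pattern token are verified, and replaces A's running strict-> argmax with a single builtin max over (overlap, -position) candidate tuples whose lexicographic order picks the leftmost maximum.
import Mathlib
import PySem

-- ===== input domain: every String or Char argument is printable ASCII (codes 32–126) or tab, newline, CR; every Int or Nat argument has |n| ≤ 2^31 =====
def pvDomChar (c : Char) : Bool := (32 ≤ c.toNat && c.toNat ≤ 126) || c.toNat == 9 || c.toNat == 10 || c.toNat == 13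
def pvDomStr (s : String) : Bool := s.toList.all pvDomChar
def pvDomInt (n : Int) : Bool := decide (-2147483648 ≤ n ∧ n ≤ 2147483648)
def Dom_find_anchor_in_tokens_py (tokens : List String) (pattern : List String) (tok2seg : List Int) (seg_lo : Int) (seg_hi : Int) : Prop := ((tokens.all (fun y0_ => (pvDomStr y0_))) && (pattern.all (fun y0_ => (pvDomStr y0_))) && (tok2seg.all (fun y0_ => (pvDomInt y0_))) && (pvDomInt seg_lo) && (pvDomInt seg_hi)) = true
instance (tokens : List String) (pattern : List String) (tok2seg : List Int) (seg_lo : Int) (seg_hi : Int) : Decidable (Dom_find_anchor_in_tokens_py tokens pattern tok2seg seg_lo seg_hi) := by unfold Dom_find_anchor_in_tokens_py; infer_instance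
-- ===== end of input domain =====

-- B replaces A's slice-compare scan over every window with an inverted index (token -> positions,
-- built in one pass) so only the positions of the first pattern token are verified, and replaces A's
-- running strict-'>' argmax with one builtin max over (overlap, -position) tuples; equal value on Pre_.

-- ===== PORT A =====
def find_anchor_in_tokens_py (tokens : List String) (pattern : List String) (tok2seg : List Int) (seg_lo : Int) (seg_hi : Int) : Option (List Int) :=
  let m : Int := pattern.length
  let best : Option (Int × Int × Int) :=
    (PySem.List.pyRange 0 ((tokens.length : Int) - m + 1) 1).foldl
      (fun best i =>
        if PySem.List.slice tokens (some i) (some (i + m)) = pattern then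
          let covered := PySem.List.slice tok2seg (some i) (some (i + m))
          match PySem.List.max? covered (fun x => x), PySem.List.min? covered (fun x => x) with
          | some mx, some mn =>
            let overlap := min mx seg_hi - max mn seg_lo + 1
            match best with
            | none => some (i, i + m - 1, overlap)
            | some b => if overlap > b.2.2 then some (i, i + m - 1, overlap) else best
          | _, _ => best  -- unreachable under Pre_: Python raises ValueError (max of empty) there
        else best)
      none
  best.map (fun b => [b.1, b.2.1, b.2.2])

-- ===== PORT B =====
-- Source B's generator 'all(tokens[i+k] == pattern[k] for k in range(1, m))': element comparison with
-- short-circuit, as recursion on the number m - j of comparisons left (called with j = 1)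
def pvMatchFrom (tokens : List String) (pattern : List String) (i : Int) (j : Int) : Nat → Bool
  | 0 => true
  | k + 1 =>
    match PySem.List.pyGet? tokens (i + j) with
    | none => false
    | some a =>
      match PySem.List.pyGet? pattern j with
      | none => false
      | some b => a == b && pvMatchFrom tokens pattern i (j + 1) k

def find_anchor_in_tokens_py_alt (tokens : List String) (pattern : List String) (tok2seg : List Int) (seg_lo : Int) (seg_hi : Int) : Option (List Int) :=
  let n : Int := tokens.length
  let m : Int := pattern.length
  -- inverted index: token value -> list of its positions (setdefault(t, []).append(i) = modify)
  let index : PySem.Dict String (List Int) :=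
    (PySem.List.enumerate tokens).foldl (fun d p => d.modify p.2 [] (fun l => l ++ [p.1])) PySem.Dict.empty
  match PySem.List.pyGet? pattern 0 with
  | none => none  -- unreachable under Pre_: Python raises IndexError on pattern[0]
  | some first =>
    let cands : List (Int × Int) :=
      (index.getD first []).foldl
        (fun c i =>
          if decide (i + m ≤ n) && pvMatchFrom tokens pattern i 1 (pattern.length - 1) then
            match PySem.List.max? (PySem.List.slice tok2seg (some i) (some (i + m))) (fun x => x) with
            | none => c  -- unreachable under Pre_: Python raises ValueError (max of empty) there
            | some mx =>
              match PySem.List.min? (PySem.List.slice tok2seg (some i) (some (i + m))) (fun x => x) with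
              | none => c
              | some mn => c ++ [(min mx seg_hi - max mn seg_lo + 1, -i)]
          else c) []
    match PySem.List.max2? cands (fun c => c.1) (fun c => c.2) with
    | none => none
    | some c => some [-c.2, -c.2 + m - 1, c.1]

-- ===== PRECONDITION & SPEC =====
-- Pre_ excludes exactly the inputs where the Python programs raise: an empty pattern (A: ValueError on
-- max of the empty slice, B: IndexError on pattern[0]), or a pattern occurrence at a position
-- i ≥ len(tok2seg) (both: ValueError, max of the empty slice tok2seg[i:i+m]).
def Pre_find_anchor_in_tokens_py (tokens : List String) (pattern : List String) (tok2seg : List Int) (seg_lo : Int) (seg_hi : Int) : Prop :=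
  pattern ≠ [] ∧ ∀ i < tokens.length, (tokens.drop i).take pattern.length = pattern → i < tok2seg.length
instance (tokens : List String) (pattern : List String) (tok2seg : List Int) (seg_lo : Int) (seg_hi : Int) : Decidable (Pre_find_anchor_in_tokens_py tokens pattern tok2seg seg_lo seg_hi) := by unfold Pre_find_anchor_in_tokens_py; infer_instance

def pvWitness_find_anchor_in_tokens_py : List String × List String × List Int × Int × Int :=
  (["a", "b", "a"], ["a"], [0, 1, 2], 0, 1)

def Spec_find_anchor_in_tokens_py (tokens : List String) (pattern : List String) (tok2seg : List Int) (seg_lo : Int) (seg_hi : Int) (out : Option (List Int)) : Prop := out = find_anchor_in_tokens_py_alt tokens pattern tok2seg seg_lo seg_hi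
instance (tokens : List String) (pattern : List String) (tok2seg : List Int) (seg_lo : Int) (seg_hi : Int) (out : Option (List Int)) : Decidable (Spec_find_anchor_in_tokens_py tokens pattern tok2seg seg_lo seg_hi out) := by unfold Spec_find_anchor_in_tokens_py; infer_instance

-- ===== CLAIM (what is proved, stated in full; the proofs are below) =====
def Claim_equal_find_anchor_in_tokens_py : Prop := ∀ (tokens : List String) (pattern : List String) (tok2seg : List Int) (seg_lo : Int) (seg_hi : Int), Dom_find_anchor_in_tokens_py tokens pattern tok2seg seg_lo seg_hi → Pre_find_anchor_in_tokens_py tokens pattern tok2seg seg_lo seg_hi → Spec_find_anchor_in_tokens_py tokens pattern tok2seg seg_lo seg_hi (find_anchor_in_tokens_py tokens pattern tok2seg seg_lo seg_hi)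

-- ===== LEMMAS AND PROOFS =====

-- the overlap value at a match position (total stand-in used only in proofs)
def pvOv (tok2seg : List Int) (m seg_lo seg_hi : Int) (i : Int) : Int :=
  match PySem.List.max? (PySem.List.slice tok2seg (some i) (some (i + m))) (fun x => x),
        PySem.List.min? (PySem.List.slice tok2seg (some i) (some (i + m))) (fun x => x) with
  | some mx, some mn => min mx seg_hi - max mn seg_lo + 1
  | _, _ => 0

-- clean total version of A's running strict-'>' argmax step
def pvGA (ov : Int → Int) (m : Int) (b : Option (Int × Int × Int)) (i : Int) : Option (Int × Int × Int) :=
  match b with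
  | none => some (i, i + m - 1, ov i)
  | some w => if ov i > w.2.2 then some (i, i + m - 1, ov i) else b

-- A's literal loop body at a match position, as a named function
def pvFA (tok2seg : List Int) (m seg_lo seg_hi : Int) (best : Option (Int × Int × Int)) (i : Int) : Option (Int × Int × Int) :=
  match PySem.List.max? (PySem.List.slice tok2seg (some i) (some (i + m))) (fun x => x),
        PySem.List.min? (PySem.List.slice tok2seg (some i) (some (i + m))) (fun x => x) with
  | some mx, some mn =>
    let overlap := min mx seg_hi - max mn seg_lo + 1
    match best with
    | none => some (i, i + m - 1, overlap)
    | some b => if overlap > b.2.2 then some (i, i + m - 1, overlap) else best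
  | _, _ => best

-- B's literal candidate-scoring loop body at a match position, as a named function
def pvFC (tok2seg : List Int) (m seg_lo seg_hi : Int) (c : List (Int × Int)) (i : Int) : List (Int × Int) :=
  match PySem.List.max? (PySem.List.slice tok2seg (some i) (some (i + m))) (fun x => x) with
  | none => c
  | some mx =>
    match PySem.List.min? (PySem.List.slice tok2seg (some i) (some (i + m))) (fun x => x) with
    | none => c
    | some mn => c ++ [(min mx seg_hi - max mn seg_lo + 1, -i)]

-- the step of Python's builtin max on (Int × Int) tuples (= PySem.List.max2?'s fold body)
def pvM2 (acc : Option (Int × Int)) (x : Int × Int) : Option (Int × Int) :=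
  match acc with
  | none => some x
  | some w => if (decide (w.1 < x.1) || !decide (x.1 < w.1) && decide (w.2 < x.2)) then some x else some w

theorem pvMax2_eq (xs : List (Int × Int)) :
    PySem.List.max2? xs (fun c => c.1) (fun c => c.2) = xs.foldl pvM2 none := by
  unfold PySem.List.max2?
  congr 1
  funext acc x
  cases acc <;> rfl

-- element-wise matcher ↔ take/drop equality
theorem pvMatch_iff : ∀ (k : Nat) (toks pat : List String) (i j : Int), 0 ≤ i → 0 ≤ j →
    pat.length = j.toNat + k →
    (pvMatchFrom toks pat i j k = true ↔ (toks.drop (i + j).toNat).take k = pat.drop j.toNat) := by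
  intro k
  induction k with
  | zero =>
    intro toks pat i j hi hj hlen
    have hd : pat.drop j.toNat = [] := List.drop_of_length_le (by omega)
    simp [pvMatchFrom, hd]
  | succ k ih =>
    intro toks pat i j hi hj hlen
    have hjlt : j.toNat < pat.length := by omega
    have hjInt : j < (pat.length : Int) := by omega
    have hpat : PySem.List.pyGet? pat j = some pat[j.toNat] :=
      PySem.List.pyGet?_eq_some_getElem pat hj hjInt
    have hij : (0:Int) ≤ i + j := by omega
    have hdropPat : pat.drop j.toNat = pat[j.toNat] :: pat.drop (j.toNat + 1) :=
      List.drop_eq_getElem_cons hjlt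
    by_cases hin : (i + j).toNat < toks.length
    · have htok : PySem.List.pyGet? toks (i + j) = some toks[(i + j).toNat] :=
        PySem.List.pyGet?_eq_some_getElem toks hij (by omega)
      have hdropTok : toks.drop (i + j).toNat = toks[(i + j).toNat] :: toks.drop ((i + j).toNat + 1) :=
        List.drop_eq_getElem_cons hin
      have hnext : (i + (j + 1)).toNat = (i + j).toNat + 1 := by omega
      have hlen' : pat.length = (j + 1).toNat + k := by omega
      have := ih toks pat i (j + 1) hi (by omega) hlen'
      rw [hnext] at this
      have hj1 : (j + 1).toNat = j.toNat + 1 := by omega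
      rw [hj1] at this
      simp only [pvMatchFrom, htok, hpat, Bool.and_eq_true, beq_iff_eq, this,
        hdropTok, hdropPat, List.take_succ_cons, List.cons.injEq]
    · have htok : PySem.List.pyGet? toks (i + j) = none := by
        rw [PySem.List.pyGet?_eq_none_iff]
        intro hr
        rcases hr with ⟨h1, h2⟩
        omega
      have hdrop : toks.drop (i + j).toNat = [] := List.drop_of_length_le (by omega)
      constructor
      · intro h; simp [pvMatchFrom, htok] at h
      · intro h
        rw [hdrop] at h
        simp only [List.take_nil] at h
        have := congrArg List.length h
        simp at this
        omega

-- slice at a nonnegative start equals take/drop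
theorem pvSliceEq {α : Type} (xs : List α) (i : Int) (M : Nat) (hi : 0 ≤ i) :
    PySem.List.slice xs (some i) (some (i + (M : Int))) = (xs.drop i.toNat).take M := by
  rw [PySem.List.slice_toNat xs hi (by omega)]
  congr 1
  omega

-- on a strictly increasing position list, A's running strict-'>' argmax equals the lexicographic
-- max over the (overlap, -position) tuples (generalized over a restart accumulator)
theorem pvArgmax (ov : Int → Int) (m : Int) :
    ∀ (l : List Int), l.Pairwise (· < ·) →
    ∀ (a : Option Int), (∀ i0, a = some i0 → ∀ j ∈ l, i0 < j) →
    l.foldl (pvGA ov m) (a.map (fun i0 => (i0, i0 + m - 1, ov i0))) =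
      ((l.map (fun i => (ov i, -i))).foldl pvM2 (a.map (fun i0 => (ov i0, -i0)))).map
        (fun c => (-c.2, -c.2 + m - 1, c.1)) := by
  intro l
  induction l with
  | nil =>
    intro _ a _
    cases a with
    | none => rfl
    | some i0 => simp
  | cons x xs ih =>
    intro hp a ha
    have hxlt : ∀ j ∈ xs, x < j := (List.pairwise_cons.1 hp).1
    have hptail : xs.Pairwise (· < ·) := (List.pairwise_cons.1 hp).2
    cases a with
    | none =>
      simp only [Option.map_none]
      have h1 : (x :: xs).foldl (pvGA ov m) none = xs.foldl (pvGA ov m) (some (x, x + m - 1, ov x)) := by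
        simp [List.foldl, pvGA]
      have h2 : ((x :: xs).map (fun i => (ov i, -i))).foldl pvM2 none
          = (xs.map (fun i => (ov i, -i))).foldl pvM2 (some (ov x, -x)) := by
        simp [pvM2]
      rw [h1, h2]
      have := ih hptail (some x) (by intro i0 h j hj; cases h; exact hxlt j hj)
      simpa using this
    | some i0 =>
      simp only [Option.map_some]
      have hi0x : i0 < x := ha i0 rfl x (List.mem_cons_self)
      have hi0xs : ∀ j ∈ xs, i0 < j := fun j hj => ha i0 rfl j (List.mem_cons_of_mem x hj)
      by_cases h : ov i0 < ov x
      · have h1 : (x :: xs).foldl (pvGA ov m) (some (i0, i0 + m - 1, ov i0))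
            = xs.foldl (pvGA ov m) (some (x, x + m - 1, ov x)) := by
          simp [List.foldl, pvGA, h]
        have h2 : ((x :: xs).map (fun i => (ov i, -i))).foldl pvM2 (some (ov i0, -i0))
            = (xs.map (fun i => (ov i, -i))).foldl pvM2 (some (ov x, -x)) := by
          simp [pvM2, h]
        rw [h1, h2]
        have := ih hptail (some x) (by intro j hjeq k hk; cases hjeq; exact hxlt k hk)
        simpa using this
      · have h1 : (x :: xs).foldl (pvGA ov m) (some (i0, i0 + m - 1, ov i0))
            = xs.foldl (pvGA ov m) (some (i0, i0 + m - 1, ov i0)) := by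
          simp [List.foldl, pvGA, h]
        have h2 : ((x :: xs).map (fun i => (ov i, -i))).foldl pvM2 (some (ov i0, -i0))
            = (xs.map (fun i => (ov i, -i))).foldl pvM2 (some (ov i0, -i0)) := by
          have hneg : ¬ (-i0 < -x) := by omega
          simp [pvM2, h, hneg]
        rw [h1, h2]
        have := ih hptail (some i0) (by intro j hjeq k hk; cases hjeq; exact hi0xs k hk)
        simpa using this

-- main equality
theorem find_anchor_main (tokens pattern : List String) (tok2seg : List Int) (seg_lo seg_hi : Int)
    (hpre : Pre_find_anchor_in_tokens_py tokens pattern tok2seg seg_lo seg_hi) :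
    find_anchor_in_tokens_py tokens pattern tok2seg seg_lo seg_hi
      = find_anchor_in_tokens_py_alt tokens pattern tok2seg seg_lo seg_hi := by
  obtain ⟨hpat, hseg⟩ := hpre
  have hM : 0 < pattern.length := List.length_pos_iff.mpr hpat
  obtain ⟨p0, prest, hpc⟩ : ∃ p0 prest, pattern = p0 :: prest := by
    cases pattern with
    | nil => exact absurd rfl hpat
    | cons a l => exact ⟨a, l, rfl⟩
  set M : Nat := pattern.length with hMdef
  set m : Int := (pattern.length : Int) with hmdef
  set n : Int := (tokens.length : Int) with hndef
  set K : Int := n - m + 1 with hKdef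
  have hm1 : (1 : Int) ≤ m := by omega
  have hfirst : PySem.List.pyGet? pattern 0 = some p0 := by
    have h := PySem.List.pyGet?_eq_some_getElem pattern (le_refl 0) (by omega)
    simpa [hpc] using h
  set ov : Int → Int := pvOv tok2seg m seg_lo seg_hi with hovdef
  set q : Int → Bool := fun i => decide (i + m ≤ n) && pvMatchFrom tokens pattern i 1 (M - 1) with hqdef
  set occ : List Int :=
    (PySem.List.pyRange 0 K).filter
      (fun i => decide (PySem.List.slice tokens (some i) (some (i + m)) = pattern)) with hoccdef
  -- facts about members of occ
  have hocc : ∀ i ∈ occ, 0 ≤ i ∧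
      PySem.List.max? (PySem.List.slice tok2seg (some i) (some (i + m))) (fun x => x) ≠ none ∧
      PySem.List.min? (PySem.List.slice tok2seg (some i) (some (i + m))) (fun x => x) ≠ none := by
    intro i hi
    rw [hoccdef, List.mem_filter, decide_eq_true_eq] at hi
    obtain ⟨hiR, hsl⟩ := hi
    obtain ⟨h0, h1⟩ := PySem.List.mem_pyRange_one.1 hiR
    have htd : (tokens.drop i.toNat).take M = pattern := by
      rw [← pvSliceEq tokens i M h0]; exact hsl
    have hiN : i.toNat < tokens.length := by omega
    have hlt : i.toNat < tok2seg.length := hseg i.toNat hiN htd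
    have hcov : PySem.List.slice tok2seg (some i) (some (i + m)) ≠ [] := by
      rw [pvSliceEq tok2seg i M h0]
      intro hnil
      rw [List.take_eq_nil_iff] at hnil
      rcases hnil with h | h
      · omega
      · have := congrArg List.length h
        simp at this
        omega
    refine ⟨h0, ?_, ?_⟩
    · rw [Ne, PySem.List.max?_eq_none_iff]; exact hcov
    · rw [Ne, PySem.List.min?_eq_none_iff]; exact hcov
  -- A's side: the guarded scan is the pvGA fold over occ
  have hAside : find_anchor_in_tokens_py tokens pattern tok2seg seg_lo seg_hi
      = (occ.foldl (pvGA ov m) none).map (fun b => [b.1, b.2.1, b.2.2]) := by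
    show ((PySem.List.pyRange 0 K 1).foldl
        (fun best i => if PySem.List.slice tokens (some i) (some (i + m)) = pattern
          then pvFA tok2seg m seg_lo seg_hi best i else best) none).map (fun b => [b.1, b.2.1, b.2.2])
      = _
    rw [PySem.List.foldl_ite_eq_foldl_filter
      (fun i => PySem.List.slice tokens (some i) (some (i + m)) = pattern)
      (pvFA tok2seg m seg_lo seg_hi) (PySem.List.pyRange 0 K 1) none]
    congr 1
    apply PySem.List.foldl_congr_mem
    intro acc i hi
    obtain ⟨h0, hmx, hmn⟩ := hocc i hi
    rcases hx : PySem.List.max? (PySem.List.slice tok2seg (some i) (some (i + m))) (fun x => x) with _ | mx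
    · exact absurd hx hmx
    rcases hn : PySem.List.min? (PySem.List.slice tok2seg (some i) (some (i + m))) (fun x => x) with _ | mn
    · exact absurd hn hmn
    have hov : ov i = min mx seg_hi - max mn seg_lo + 1 := by
      rw [hovdef]; simp [pvOv, hx, hn]
    cases acc with
    | none => simp [pvFA, pvGA, hx, hn, hov]
    | some b => simp [pvFA, pvGA, hx, hn, hov]
  -- the inverted index looked up at p0 = the positions of p0, in order
  have hidx : ((PySem.List.enumerate tokens).foldl
        (fun d p => d.modify p.2 [] (fun l => l ++ [p.1])) PySem.Dict.empty).getD p0 []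
      = (PySem.List.pyRange 0 n).filter (fun j => PySem.List.pyGetD tokens j "" == p0) := by
    rw [PySem.List.enumerate_eq_map_pyRange tokens "", List.foldl_map]
    have hswap : (PySem.List.pyRange 0 (PySem.List.len tokens)).foldl
        (fun d j => d.modify ((j, PySem.List.pyGetD tokens j "").2) []
          (fun l => l ++ [(j, PySem.List.pyGetD tokens j "").1])) PySem.Dict.empty
      = ((PySem.List.pyRange 0 (PySem.List.len tokens)).map
          (fun j => (PySem.List.pyGetD tokens j "", j))).foldl
          (fun d p => d.modify p.1 [] (fun l => l ++ [p.2])) PySem.Dict.empty := by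
      rw [List.foldl_map]
    rw [hswap, PySem.Dict.getD_foldl_modify_append, List.filter_map]
    simp only [PySem.Dict.getD_empty, List.nil_append, List.map_map]
    have hlen : PySem.List.len tokens = n := rfl
    rw [hlen]
    have : ((fun x : String × Int => x.2) ∘ fun j => (PySem.List.pyGetD tokens j "", j)) = id := rfl
    rw [this, List.map_id]
    rfl
  -- the combined filter equals occ
  have hpoint : ∀ j, 0 ≤ j → j < n →
      (q j && (PySem.List.pyGetD tokens j "" == p0))
        = (decide (j < K) && decide (PySem.List.slice tokens (some j) (some (j + m)) = pattern)) := by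
    intro j h0 h1
    have hget : PySem.List.pyGetD tokens j "" = tokens[j.toNat] :=
      PySem.List.pyGetD_eq_getElem tokens "" h0 (by omega)
    by_cases hjK : j < K
    · have hguard : decide (j + m ≤ n) = true := by simp; omega
      have hmt := pvMatch_iff (M - 1) tokens pattern j 1 h0 (by omega) (by omega)
      have hj1 : (j + 1).toNat = j.toNat + 1 := by omega
      rw [hj1] at hmt
      have hdrop1 : pattern.drop (1 : Int).toNat = prest := by simp [hpc]
      rw [hdrop1] at hmt
      have hsl : (PySem.List.slice tokens (some j) (some (j + m)) = pattern)
          ↔ (tokens[j.toNat] = p0 ∧ (tokens.drop (j.toNat + 1)).take (M - 1) = prest) := by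
        rw [pvSliceEq tokens j M h0]
        have hdT : tokens.drop j.toNat = tokens[j.toNat] :: tokens.drop (j.toNat + 1) :=
          List.drop_eq_getElem_cons (by omega)
        rw [hdT, hpc]
        have hMsub : M - 1 = prest.length := by
          have : M = prest.length + 1 := by rw [hMdef, hpc]; simp
          omega
        rw [show M = (M - 1) + 1 by omega, List.take_succ_cons, hMsub, List.cons.injEq]
        simp
      have hmb : pvMatchFrom tokens pattern j 1 (M - 1)
          = decide ((tokens.drop (j.toNat + 1)).take (M - 1) = prest) := by
        by_cases hP : (tokens.drop (j.toNat + 1)).take (M - 1) = prest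
        · simp [hmt, hP]
        · simp only [hP, decide_false]
          rw [← Bool.not_eq_true]
          rw [hmt]
          exact hP
      rw [hqdef]
      simp only [hguard, Bool.true_and, hmb, hget]
      have hK' : decide (j < K) = true := by simp [hjK]
      rw [hK']
      simp only [Bool.true_and]
      by_cases h0' : tokens[j.toNat] = p0 <;> by_cases h1' : (tokens.drop (j.toNat + 1)).take (M - 1) = prest <;>
        simp [hsl, h0', h1']
    · have hguard : decide (j + m ≤ n) = false := by simp; omega
      have hK' : decide (j < K) = false := by simp; omega
      rw [hqdef]
      simp [hguard, hK']
  have hcomb : ((PySem.List.pyRange 0 n).filter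
        (fun j => PySem.List.pyGetD tokens j "" == p0)).filter q = occ := by
    rw [List.filter_filter]
    have hstep : (PySem.List.pyRange 0 n).filter
        (fun j => q j && (PySem.List.pyGetD tokens j "" == p0))
      = (PySem.List.pyRange 0 n).filter
        (fun j => decide (j < K) && decide (PySem.List.slice tokens (some j) (some (j + m)) = pattern)) := by
      apply List.filter_congr
      intro j hj
      obtain ⟨h0, h1⟩ := PySem.List.mem_pyRange_one.1 hj
      exact hpoint j h0 h1
    rw [hstep, hoccdef]
    by_cases hK0 : K ≤ 0
    · have hl : (PySem.List.pyRange 0 n).filter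
          (fun j => decide (j < K) && decide (PySem.List.slice tokens (some j) (some (j + m)) = pattern)) = [] := by
        rw [List.filter_eq_nil_iff]
        intro j hj
        obtain ⟨h0, _⟩ := PySem.List.mem_pyRange_one.1 hj
        simp only [Bool.and_eq_true, decide_eq_true_eq, not_and]
        intro hjK
        omega
      have hr : (PySem.List.pyRange 0 K).filter
          (fun i => decide (PySem.List.slice tokens (some i) (some (i + m)) = pattern)) = [] := by
        rw [List.filter_eq_nil_iff]
        intro j hj
        obtain ⟨h0, h1⟩ := PySem.List.mem_pyRange_one.1 hj
        omega
      rw [hl, hr]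
    · have hKn : K ≤ n := by omega
      rw [PySem.List.pyRange_one_append 0 K n (by omega) hKn, List.filter_append]
      have htail : (PySem.List.pyRange K n).filter
          (fun j => decide (j < K) && decide (PySem.List.slice tokens (some j) (some (j + m)) = pattern)) = [] := by
        rw [List.filter_eq_nil_iff]
        intro j hj
        obtain ⟨h0, _⟩ := PySem.List.mem_pyRange_one.1 hj
        simp only [Bool.and_eq_true, decide_eq_true_eq, not_and]
        intro hjK
        omega
      rw [htail, List.append_nil]
      apply List.filter_congr
      intro j hj
      obtain ⟨h0, h1⟩ := PySem.List.mem_pyRange_one.1 hj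
      have : decide (j < K) = true := by simp [h1]
      rw [this, Bool.true_and]
  -- B's side: candidates are occ scored with (overlap, -i)
  have hBside : find_anchor_in_tokens_py_alt tokens pattern tok2seg seg_lo seg_hi
      = (match PySem.List.max2? (occ.map (fun i => (ov i, -i))) (fun c => c.1) (fun c => c.2) with
         | none => none
         | some c => some [-c.2, -c.2 + m - 1, c.1]) := by
    have hB1 : find_anchor_in_tokens_py_alt tokens pattern tok2seg seg_lo seg_hi
        = (match PySem.List.max2?
            ((((PySem.List.enumerate tokens).foldl
                (fun d p => d.modify p.2 [] (fun l => l ++ [p.1])) PySem.Dict.empty).getD p0 []).foldl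
              (fun c i => if q i then pvFC tok2seg m seg_lo seg_hi c i else c) [])
            (fun c => c.1) (fun c => c.2) with
           | none => none
           | some c => some [-c.2, -c.2 + m - 1, c.1]) := by
      unfold find_anchor_in_tokens_py_alt
      rw [hfirst]
      rfl
    rw [hB1, hidx, PySem.List.foldl_if_eq_foldl_filter q (pvFC tok2seg m seg_lo seg_hi), hcomb]
    have hcands : occ.foldl (pvFC tok2seg m seg_lo seg_hi) []
        = occ.map (fun i => (ov i, -i)) := by
      have hcongr : occ.foldl (pvFC tok2seg m seg_lo seg_hi) []
          = occ.foldl (fun c i => c ++ [(ov i, -i)]) [] := by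
        apply PySem.List.foldl_congr_mem
        intro acc i hi
        obtain ⟨h0, hmx, hmn⟩ := hocc i hi
        rcases hx : PySem.List.max? (PySem.List.slice tok2seg (some i) (some (i + m))) (fun x => x) with _ | mx
        · exact absurd hx hmx
        rcases hn : PySem.List.min? (PySem.List.slice tok2seg (some i) (some (i + m))) (fun x => x) with _ | mn
        · exact absurd hn hmn
        have hov : ov i = min mx seg_hi - max mn seg_lo + 1 := by
          rw [hovdef]; simp [pvOv, hx, hn]
        simp [pvFC, hx, hn, hov]
      rw [hcongr, PySem.List.foldl_append_singleton_eq_map, List.nil_append]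
    rw [hcands]
  -- conclude by the argmax correspondence on the strictly increasing occ
  have hpw : occ.Pairwise (· < ·) :=
    List.Pairwise.filter _ (PySem.List.pairwise_lt_pyRange_one 0 K)
  have harg := pvArgmax ov m occ hpw none (by intro i0 h; cases h)
  simp only [Option.map_none] at harg
  rw [hAside, hBside, harg, pvMax2_eq]
  cases (occ.map (fun i => (ov i, -i))).foldl pvM2 none with
  | none => rfl
  | some c => simp

-- ===== VERDICT (by name: the statement is the Claim_ definition above) =====
theorem find_anchor_in_tokens_py_spec : Claim_equal_find_anchor_in_tokens_py := by
  intro tokens pattern tok2seg seg_lo seg_hi _hdom hpre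
  exact find_anchor_main tokens pattern tok2seg seg_lo seg_hi hpre
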